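-- pv_equiv track=rewrite | github.com/opengit/gitopenlib | gitopenlib/utils/basics.py | filter_by_thresholds
-- ===== SOURCE A (Python) =====
-- from typing import Any, Dict, Iterable, List, Union, Tuple
--
-- def filter_by_thresholds(
--     data: list, thresholds: list, threshold_closed: str = None
-- ) -> List:
--     """依据阈值范围对数据进行过滤。
--
--     依据 threshold 中的规则对 data 数据进行过滤，threshold_closed
--     规定区间规则的闭合状态，rl/lr表示区间两端闭合，r表示右闭合，l表示左闭合。
--
--     Args:
--         data:
--             list类型的数据
--         thresholds:
--             list类型的参数，元素为tuple类型。
--         threshold_closed: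
--             str类型的参数，rl/lr表示区间两端闭合，r表示右闭合，l表示左闭合，None表示两端开区间。
--
--     Returns:
--         List:
--             按照区间保留下来的数据。
--     """
--     for th in thresholds:
--         for index, value in enumerate(data):
--             if threshold_closed == "rl" or threshold_closed == "lr":
--                 # 闭合区间，保留区间内的所有值，排除区间外的值
--                 if value < th[0] or value > th[1]:
--                     data[index] = ""
--             if threshold_closed == "r":
--                 # 左开右闭
--                 if value <= th[0] or value > th[1]:
--                     data[index] = ""
--             if threshold_closed == "l":
--                 # 左闭右开
--                 if value < th[0] or value >= th[1]:
--                     data[index] = ""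
--             if threshold_closed is None:
--                 # 两端开区间
--                 if value <= th[0] or value >= th[1]:
--                     data[index] = ""
--         data = remove_0_str(data)
--
--     return data
--
-- def remove_0_str(data: list) -> List:
--     """去除list列表中为长度为0的字符串，用于字符串split后，列表中出现长度为0字符串的去除。"""
--     return [item for item in data if len(str(item)) != 0]
-- ===== SOURCE B (Python) =====
-- def filter_by_thresholds(data: list, thresholds: list, threshold_closed: str = None):
--     # Collapse all threshold intervals into one (lo = max of lefts, hi = min of rights),
--     # then keep the data in a single pass.  (Return-value equivalent to A; unlike A it
--     # does not mutate the caller's list.)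
--     if threshold_closed == "rl" or threshold_closed == "lr":
--         left_open, right_open = False, False
--     elif threshold_closed == "r":
--         left_open, right_open = True, False
--     elif threshold_closed == "l":
--         left_open, right_open = False, True
--     elif threshold_closed is None:
--         left_open, right_open = True, True
--     else:
--         return data
--     if not thresholds:
--         return data
--     lo = max(th[0] for th in thresholds)
--     hi = min(th[1] for th in thresholds)
--     return [v for v in data
--             if (lo < v if left_open else lo <= v)
--             and (v < hi if right_open else v <= hi)]
-- ===== Notes on version B (the rewrite author's own statement) =====
-- stated objective: faster
-- what changed: Instead of A's T passes that blank out-of-interval entries with "" and re-filter the list after each threshold, B collapses all thresholds into one interval (lo = max of left ends, hi = min of right ends) and keeps the data in a single filtering pass; B does not mutate the caller's list (return-value equivalence only).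
-- outside the precondition, e.g. on filter_by_thresholds([0], [(5,)], 'rl'): A returns [], B raises IndexError
import Mathlib
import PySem

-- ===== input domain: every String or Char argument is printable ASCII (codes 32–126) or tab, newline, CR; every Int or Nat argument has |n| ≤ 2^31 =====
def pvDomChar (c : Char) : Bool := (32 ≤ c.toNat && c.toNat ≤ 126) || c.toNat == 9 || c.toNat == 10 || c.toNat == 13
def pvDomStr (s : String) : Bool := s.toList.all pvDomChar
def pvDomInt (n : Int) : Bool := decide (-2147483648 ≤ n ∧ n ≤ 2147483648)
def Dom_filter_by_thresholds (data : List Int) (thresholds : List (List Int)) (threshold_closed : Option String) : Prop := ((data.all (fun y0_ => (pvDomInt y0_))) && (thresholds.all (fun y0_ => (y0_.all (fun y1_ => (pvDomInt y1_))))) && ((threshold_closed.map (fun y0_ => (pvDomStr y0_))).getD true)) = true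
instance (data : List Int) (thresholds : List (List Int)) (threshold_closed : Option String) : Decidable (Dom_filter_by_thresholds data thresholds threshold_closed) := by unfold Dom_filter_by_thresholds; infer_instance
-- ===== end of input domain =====

-- B collapses A's per-threshold passes into one interval (max of left ends, min of right ends)
-- and a single filtering pass. Equivalence is about the RETURN value only: Python A mutates the
-- caller's list during its first pass, B does not.

-- ===== PORT A =====
-- Intermediate list entries are Option Int: `none` models the "" sentinel A writes into the list.
-- str(item) for an Option Int entry ("" for the sentinel, str(n) for an int).
def pvStrOf (x : Option Int) : String :=
  match x with
  | none => ""
  | some v => PySem.Int.toStr v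

-- helper remove_0_str: keep items with len(str(item)) != 0
def pvRemove0Str (d : List (Option Int)) : List (Option Int) :=
  d.filter (fun x => PySem.Str.len (pvStrOf x) ≠ 0)

-- the four independent `if` tests of A's inner loop, all on the value yielded by enumerate;
-- the mode tests are mutually exclusive, so this chain is the same decision.
-- th[0]/th[1]: Pre_ guarantees 2 ≤ th.length, so getD is exact there.
def pvEraseA (threshold_closed : Option String) (th : List Int) (v : Int) : Bool :=
  let t0 := th.getD 0 0
  let t1 := th.getD 1 0
  if threshold_closed = some "rl" ∨ threshold_closed = some "lr" then decide (v < t0 ∨ t1 < v)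
  else if threshold_closed = some "r" then decide (v ≤ t0 ∨ t1 < v)
  else if threshold_closed = some "l" then decide (v < t0 ∨ t1 ≤ v)
  else if threshold_closed = none then decide (v ≤ t0 ∨ t1 ≤ v)
  else false

def filter_by_thresholds (data : List Int) (thresholds : List (List Int)) (threshold_closed : Option String) : List Int :=
  -- outer loop over thresholds: blank matching entries (the inner enumerate loop is an
  -- elementwise map: the mutation at `index` is never re-read), then data = remove_0_str(data)
  let res : List (Option Int) := thresholds.foldl
    (fun d th =>
      pvRemove0Str (d.map (fun x =>
        match x with
        | none => none        -- unreachable: "" entries were removed at the end of the previous pass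
        | some v => if pvEraseA threshold_closed th v then none else some v)))
    (data.map some)
  -- representation conversion back to List Int (the loop leaves no `none` entries)
  res.filterMap id

-- ===== PORT B =====
-- mode table: (left_open, right_open); none = unrecognised mode, return data unchanged
def pvModeB (threshold_closed : Option String) : Option (Bool × Bool) :=
  if threshold_closed = some "rl" ∨ threshold_closed = some "lr" then some (false, false)
  else if threshold_closed = some "r" then some (true, false)
  else if threshold_closed = some "l" then some (false, true)
  else if threshold_closed = none then some (true, true)
  else none

def filter_by_thresholds_alt (data : List Int) (thresholds : List (List Int)) (threshold_closed : Option String) : List Int :=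
  match pvModeB threshold_closed with
  | none => data
  | some (lopen, ropen) =>
    match thresholds with
    | [] => data
    | t :: ts =>
      -- lo = max(th[0] for th in thresholds), hi = min(th[1] for th in thresholds)
      let lo := ts.foldl (fun a th => max a (th.getD 0 0)) (t.getD 0 0)
      let hi := ts.foldl (fun a th => min a (th.getD 1 0)) (t.getD 1 0)
      data.filter (fun v =>
        (if lopen then decide (lo < v) else decide (lo ≤ v)) &&
        (if ropen then decide (v < hi) else decide (v ≤ hi)))

-- ===== PRECONDITION & SPEC =====
-- Pre_ excludes inputs where the mode is one of the five A acts on AND some threshold has fewer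
-- than 2 elements: A raises IndexError on th[0]/th[1] for nearly all of them (and returns only by
-- short-circuit accident, e.g. when every value is blanked before th[1] is read, or data is
-- empty), while B's max/min scan raises there; with an unrecognised mode neither reads thresholds.
def Pre_filter_by_thresholds (data : List Int) (thresholds : List (List Int)) (threshold_closed : Option String) : Prop :=
  (threshold_closed = some "rl" ∨ threshold_closed = some "lr" ∨ threshold_closed = some "r" ∨
   threshold_closed = some "l" ∨ threshold_closed = none) → ∀ th ∈ thresholds, 2 ≤ th.length
instance (data : List Int) (thresholds : List (List Int)) (threshold_closed : Option String) : Decidable (Pre_filter_by_thresholds data thresholds threshold_closed) := by unfold Pre_filter_by_thresholds; infer_instance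

def pvWitness_filter_by_thresholds : List Int × List (List Int) × Option String :=
  ([1, 2, 3, 4, 5], [[2, 4], [1, 3]], some "rl")

def Spec_filter_by_thresholds (data : List Int) (thresholds : List (List Int)) (threshold_closed : Option String) (out : List Int) : Prop := out = filter_by_thresholds_alt data thresholds threshold_closed
instance (data : List Int) (thresholds : List (List Int)) (threshold_closed : Option String) (out : List Int) : Decidable (Spec_filter_by_thresholds data thresholds threshold_closed out) := by unfold Spec_filter_by_thresholds; infer_instance

-- ===== CLAIM (what is proved, stated in full; the proofs are below) =====
def Claim_equal_filter_by_thresholds : Prop := ∀ (data : List Int) (thresholds : List (List Int)) (threshold_closed : Option String), Dom_filter_by_thresholds data thresholds threshold_closed → Pre_filter_by_thresholds data thresholds threshold_closed → Spec_filter_by_thresholds data thresholds threshold_closed (filter_by_thresholds data thresholds threshold_closed)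

-- ===== LEMMAS AND PROOFS =====

theorem pvToStr_ne_empty (v : Int) : PySem.Int.toStr v ≠ "" := by
  simp only [PySem.Int.toStr, PySem.Int.toChars]
  split
  · simp
  · intro h
    have h2 : (0:Nat) < (Nat.toDigits 10 v.toNat).length := Nat.length_toDigits_pos
    rw [show Nat.toDigits 10 v.toNat = ([] : List Char) from by
      have := congrArg String.toList h; simpa using this] at h2
    simp at h2

-- one A-pass on a list of pure ints is a filter
theorem pvStepA_eq_filter (mode : Option String) (th : List Int) (l : List Int) :
    pvRemove0Str ((l.map some).map (fun x =>
        match x with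
        | none => none
        | some v => if pvEraseA mode th v then none else some v))
      = (l.filter (fun v => ! pvEraseA mode th v)).map some := by
  induction l with
  | nil => rfl
  | cons v l ih =>
    simp only [List.map_cons, List.filter_cons]
    by_cases h : pvEraseA mode th v = true
    · simpa [pvRemove0Str, List.filter_cons, h, pvStrOf] using ih
    · simp only [Bool.not_eq_true] at h
      simp [pvRemove0Str, h, pvStrOf, pvToStr_ne_empty v] at ih ⊢
      exact ih

-- A's whole loop is an iterated filter (the entries stay pure ints)
theorem pvLoopA_eq (mode : Option String) (ths : List (List Int)) (l : List Int) :
    ths.foldl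
      (fun d th =>
        pvRemove0Str (d.map (fun x =>
          match x with
          | none => none
          | some v => if pvEraseA mode th v then none else some v)))
      (l.map some)
    = (ths.foldl (fun l th => l.filter (fun v => ! pvEraseA mode th v)) l).map some := by
  induction ths generalizing l with
  | nil => rfl
  | cons th ths ih =>
    simp only [List.foldl_cons, pvStepA_eq_filter]
    exact ih _

-- iterated filter is one filter by the conjunction
theorem pvFoldFilter_eq (p : List Int → Int → Bool) (ths : List (List Int)) (l : List Int) :
    ths.foldl (fun l th => l.filter (fun v => p th v)) l
      = l.filter (fun v => ths.all (fun th => p th v)) := by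
  induction ths generalizing l with
  | nil => simp
  | cons th ths ih => simp [ih, List.filter_filter, Bool.and_comm]

-- fold-max / fold-min brackets
theorem pvFoldMax_lt (f : List Int → Int) (ts : List (List Int)) (a v : Int) :
    ts.foldl (fun acc th => max acc (f th)) a < v ↔ a < v ∧ ∀ th ∈ ts, f th < v := by
  induction ts generalizing a with
  | nil => simp
  | cons t ts ih => simp [ih]; tauto

theorem pvFoldMax_le (f : List Int → Int) (ts : List (List Int)) (a v : Int) :
    ts.foldl (fun acc th => max acc (f th)) a ≤ v ↔ a ≤ v ∧ ∀ th ∈ ts, f th ≤ v := by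
  induction ts generalizing a with
  | nil => simp
  | cons t ts ih => simp [ih]; tauto

theorem pvLt_foldMin (f : List Int → Int) (ts : List (List Int)) (a v : Int) :
    v < ts.foldl (fun acc th => min acc (f th)) a ↔ v < a ∧ ∀ th ∈ ts, v < f th := by
  induction ts generalizing a with
  | nil => simp
  | cons t ts ih => simp [ih]; tauto

theorem pvLe_foldMin (f : List Int → Int) (ts : List (List Int)) (a v : Int) :
    v ≤ ts.foldl (fun acc th => min acc (f th)) a ↔ v ≤ a ∧ ∀ th ∈ ts, v ≤ f th := by
  induction ts generalizing a with
  | nil => simp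
  | cons t ts ih => simp [ih]; tauto

-- the per-element keep test agrees with B's collapsed-interval test
theorem pvAllKeep (mode : Option String) (lopen ropen : Bool)
    (hmode : pvModeB mode = some (lopen, ropen)) (t : List Int) (ts : List (List Int)) (v : Int) :
    (t :: ts).all (fun th => ! pvEraseA mode th v)
      = ((if lopen then decide (ts.foldl (fun a th => max a (th.getD 0 0)) (t.getD 0 0) < v)
          else decide (ts.foldl (fun a th => max a (th.getD 0 0)) (t.getD 0 0) ≤ v)) &&
         (if ropen then decide (v < ts.foldl (fun a th => min a (th.getD 1 0)) (t.getD 1 0))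
          else decide (v ≤ ts.foldl (fun a th => min a (th.getD 1 0)) (t.getD 1 0)))) := by
  unfold pvModeB at hmode
  rw [Bool.eq_iff_iff]
  split_ifs at hmode with h1 h2 h3 h4 <;> cases hmode
  · simp [pvEraseA, h1, pvFoldMax_le, pvLe_foldMin, forall₂_and]; tauto
  · simp [pvEraseA, h1, h2, pvFoldMax_lt, pvLe_foldMin, forall₂_and]; tauto
  · simp [pvEraseA, h1, h2, h3, pvFoldMax_le, pvLt_foldMin, forall₂_and]; tauto
  · simp [pvEraseA, h1, h2, h3, h4, pvFoldMax_lt, pvLt_foldMin, forall₂_and]; tauto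

-- unrecognised mode: A erases nothing
theorem pvEraseA_unknown (mode : Option String) (hmode : pvModeB mode = none) (th : List Int) (v : Int) :
    pvEraseA mode th v = false := by
  unfold pvModeB at hmode
  unfold pvEraseA
  split_ifs at hmode <;> simp_all

-- ===== VERDICT (by name: the statement is the Claim_ definition above) =====
theorem filter_by_thresholds_spec : Claim_equal_filter_by_thresholds := by
  intro data thresholds mode _ _
  unfold Spec_filter_by_thresholds
  unfold filter_by_thresholds filter_by_thresholds_alt
  rw [pvLoopA_eq, pvFoldFilter_eq]
  cases hmode : pvModeB mode with
  | none => simp [pvEraseA_unknown mode hmode]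
  | some lr =>
    obtain ⟨lopen, ropen⟩ := lr
    cases thresholds with
    | nil => simp
    | cons t ts =>
      dsimp only
      rw [List.filter_congr (fun v _ => pvAllKeep mode lopen ropen hmode t ts v)]
      simp
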